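-- pv_equiv track=rewrite | github.com/tn3wman/qnty | src/qnty/extensions/reporting/report_ir.py | _expand_custom_macros
-- ===== SOURCE A (Python) =====
-- def _expand_custom_macros(latex: str) -> str:
--     r"""Expand custom LaTeX macros to standard LaTeX for Markdown compatibility.
--
--     Markdown renderers (GitHub, MathJax, KaTeX) don't support custom macros
--     defined in LaTeX preambles, so we need to expand:
--     - \magn{...} → |...| (magnitude notation)
--     - \vv{...} → \vec{...} (vector notation)
--     """
--     result = latex
--
--     # Expand \vv{...} to \vec{...}
--     # Need to handle nested braces properly
--     def expand_vv(text):
--         """Expand \vv{...} to \vec{...}, handling nested braces."""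
--         output = []
--         i = 0
--         while i < len(text):
--             if text[i:i+4] == r'\vv{':
--                 # Find matching closing brace
--                 start = i + 4
--                 depth = 1
--                 j = start
--                 while j < len(text) and depth > 0:
--                     if text[j] == '{':
--                         depth += 1
--                     elif text[j] == '}':
--                         depth -= 1
--                     j += 1
--                 inner = text[start:j-1]
--                 # Recursively expand any nested \vv
--                 inner = expand_vv(inner)
--                 output.append(r'\vec{' + inner + '}')
--                 i = j
--             else:
--                 output.append(text[i])
--                 i += 1
--         return ''.join(output)
--
--     result = expand_vv(result)
--
--     # Expand \magn{...} to |...|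
--     def expand_magn(text):
--         r"""Expand \magn{...} to |...|, handling nested braces."""
--         output = []
--         i = 0
--         while i < len(text):
--             if text[i:i+6] == r'\magn{':
--                 # Find matching closing brace
--                 start = i + 6
--                 depth = 1
--                 j = start
--                 while j < len(text) and depth > 0:
--                     if text[j] == '{':
--                         depth += 1
--                     elif text[j] == '}':
--                         depth -= 1
--                     j += 1
--                 inner = text[start:j-1]
--                 # Recursively expand any nested \magn
--                 inner = expand_magn(inner)
--                 output.append('|' + inner + '|')
--                 i = j
--             else:
--                 output.append(text[i])
--                 i += 1
--         return ''.join(output)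
--
--     result = expand_magn(result)
--
--     return result
-- ===== SOURCE B (Python) =====
-- def _expand_custom_macros(latex: str) -> str:
--     r"""Expand \vv{...} -> \vec{...} and \magn{...} -> |...| .
--
--     \vv{ keeps its closing brace, so it is a plain textual substitution; the
--     \magn groups are rewritten in one linear scan that keeps a stack of the
--     currently open braces, so each closing brace knows whether it closes a
--     \magn group (emit a magnitude bar) or an ordinary brace (kept as is).
--     """
--     s = latex.replace('\\vv{', '\\vec{')
--     out = []
--     stack = []
--     i = 0
--     n = len(s)
--     while i < n:
--         c = s[i]
--         if c == '\\' and s.startswith('\\magn{', i):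
--             out.append('|')
--             stack.append(True)
--             i += 6
--         elif c == '{':
--             out.append('{')
--             stack.append(False)
--             i += 1
--         elif c == '}':
--             out.append('|' if (stack and stack.pop()) else '}')
--             i += 1
--         else:
--             out.append(c)
--             i += 1
--     return ''.join(out)
-- ===== Notes on version B (the rewrite author's own statement) =====
-- stated objective: faster
-- what changed: A makes two recursive-descent passes (one per macro), each re-scanning every group body to find its matching brace and then re-expanding it recursively; B does one textual substitution of the vv opener plus a single linear scan that keeps a stack of open braces and emits either a magnitude bar or a plain closing brace when a group closes.
-- outside the precondition, e.g. on _expand_custom_macros('\\vv{a'): A returns '\\vec{}', B returns '\\vec{a'; on _expand_custom_macros('\\magn{ab'): A returns '|a|', B returns '|ab'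
import Mathlib
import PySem

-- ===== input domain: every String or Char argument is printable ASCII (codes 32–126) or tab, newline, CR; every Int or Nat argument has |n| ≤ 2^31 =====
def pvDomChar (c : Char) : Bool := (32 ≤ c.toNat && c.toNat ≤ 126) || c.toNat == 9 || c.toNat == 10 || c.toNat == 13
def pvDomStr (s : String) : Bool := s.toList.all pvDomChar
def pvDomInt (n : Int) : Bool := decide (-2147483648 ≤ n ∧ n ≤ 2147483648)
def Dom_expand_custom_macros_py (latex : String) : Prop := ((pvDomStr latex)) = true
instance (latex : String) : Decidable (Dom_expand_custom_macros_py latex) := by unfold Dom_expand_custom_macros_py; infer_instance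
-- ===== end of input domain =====

-- B replaces A's two recursive-descent passes (each re-scanning group bodies for the
-- matching brace and re-expanding them) by one \vv{ -> \vec{ substitution plus a single
-- linear scan with a stack of open braces; measured faster, asymptotically on nested groups.

-- ===== PORT A =====
-- A's inner `while j < len(text) and depth > 0` scanner: number of characters consumed.
def pvScan : List Char → Nat → Nat
  | [], _ => 0
  | c :: rest, d =>
    let d' := if c = '{' then d + 1 else if c = '}' then d - 1 else d
    if d' = 0 then 1 else 1 + pvScan rest d'

-- A's expand_vv: `text[i:i+4] == '\vv{'` is the 4-char head pattern.
def pvExpandVV : List Char → List Char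
  | '\\' :: 'v' :: 'v' :: '{' :: tail =>
      let k := pvScan tail 1
      '\\' :: 'v' :: 'e' :: 'c' :: '{' ::
        (pvExpandVV (tail.take (k - 1)) ++ '}' :: pvExpandVV (tail.drop k))
  | c :: rest => c :: pvExpandVV rest
  | [] => []
  termination_by t => t.length
  decreasing_by
  · simp; omega
  · simp; omega
  · simp

-- A's expand_magn, same shape with the 6-char head pattern and '|' delimiters.
def pvExpandMagn : List Char → List Char
  | '\\' :: 'm' :: 'a' :: 'g' :: 'n' :: '{' :: tail =>
      let k := pvScan tail 1
      '|' :: (pvExpandMagn (tail.take (k - 1)) ++ '|' :: pvExpandMagn (tail.drop k))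
  | c :: rest => c :: pvExpandMagn rest
  | [] => []
  termination_by t => t.length
  decreasing_by
  · simp; omega
  · simp; omega
  · simp

def expand_custom_macros_py (latex : String) : String :=
  String.ofList (pvExpandMagn (pvExpandVV latex.toList))

-- ===== PORT B =====
-- Source B's single scan: stack entry `true` = open \magn group, `false` = ordinary '{'.
def pvMach : List Char → List Bool → List Char
  | '\\' :: 'm' :: 'a' :: 'g' :: 'n' :: '{' :: rest, st => '|' :: pvMach rest (true :: st)
  | '{' :: rest, st => '{' :: pvMach rest (false :: st)
  | '}' :: rest, b :: st => (if b then '|' else '}') :: pvMach rest st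
  | '}' :: rest, [] => '}' :: pvMach rest []
  | c :: rest, st => c :: pvMach rest st
  | [], _ => []

def expand_custom_macros_py_alt (latex : String) : String :=
  String.ofList (pvMach (PySem.Str.replace latex "\\vv{" "\\vec{").toList [])

-- ===== PRECONDITION & SPEC =====
def pvUpd (c : Char) (d : Nat) : Nat := if c = '{' then d + 1 else if c = '}' then d - 1 else d

-- brace-matching well-formedness: scanning from depth d, the depth reaches 0 (group closes)
def pvCloses : List Char → Nat → Bool
  | [], _ => false
  | c :: rest, d => if pvUpd c d = 0 then true else pvCloses rest (pvUpd c d)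

-- every occurrence of the macro opener `tok` is followed by a matching closing brace
def pvGoodT (tok : List Char) : List Char → Bool
  | [] => true
  | c :: rest =>
      (if tok.isPrefixOf (c :: rest) then pvCloses (List.drop tok.length (c :: rest)) 1
       else true) && pvGoodT tok rest

-- Pre_ excludes inputs containing an unterminated \vv{ or \magn{ group: malformed LaTeX on
-- which no particular expansion is specified (A force-closes the group and drops the last
-- scanned character, B expands the opener and leaves the rest of the text as scanned).
def Pre_expand_custom_macros_py (latex : String) : Prop :=
  pvGoodT ['\\', 'v', 'v', '{'] latex.toList = true ∧
  pvGoodT ['\\', 'm', 'a', 'g', 'n', '{'] latex.toList = true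
instance (latex : String) : Decidable (Pre_expand_custom_macros_py latex) := by
  unfold Pre_expand_custom_macros_py; infer_instance

def pvWitness_expand_custom_macros_py : String := "\\vv{\\magn{F_{x}}} = \\magn{\\vv{F}}"

def Spec_expand_custom_macros_py (latex : String) (out : String) : Prop :=
  out = expand_custom_macros_py_alt latex
instance (latex : String) (out : String) : Decidable (Spec_expand_custom_macros_py latex out) := by
  unfold Spec_expand_custom_macros_py; infer_instance

-- ===== CLAIM (what is proved, stated in full; the proofs are below) =====
def Claim_equal_expand_custom_macros_py : Prop := ∀ (latex : String), Dom_expand_custom_macros_py latex → Pre_expand_custom_macros_py latex → Spec_expand_custom_macros_py latex (expand_custom_macros_py latex)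

-- ===== LEMMAS AND PROOFS =====

-- the literal substitution \vv{ -> \vec{ (what both A's first pass and B's `replace` compute)
def pvSV : List Char → List Char
  | '\\' :: 'v' :: 'v' :: '{' :: t => '\\' :: 'v' :: 'e' :: 'c' :: '{' :: pvSV t
  | c :: r => c :: pvSV r
  | [] => []

-- depth bookkeeping for balance arguments
def pvNoZ : List Char → Nat → Bool
  | [], _ => true
  | c :: r, d => (pvUpd c d != 0) && pvNoZ r (pvUpd c d)

def pvEndD : List Char → Nat → Nat
  | [], d => d
  | c :: r, d => pvEndD r (pvUpd c d)

theorem pvEndD_append (a b : List Char) (d : Nat) : pvEndD (a ++ b) d = pvEndD b (pvEndD a d) := by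
  induction a generalizing d with
  | nil => rfl
  | cons c r ih => simp [pvEndD, ih]

theorem pvNoZ_append (a b : List Char) (d : Nat) :
    pvNoZ (a ++ b) d = (pvNoZ a d && pvNoZ b (pvEndD a d)) := by
  induction a generalizing d with
  | nil => simp [pvNoZ, pvEndD]
  | cons c r ih => simp [pvNoZ, pvEndD, ih, Bool.and_assoc]

theorem pvScan_cons (c : Char) (r : List Char) (d : Nat) :
    pvScan (c :: r) d = if pvUpd c d = 0 then 1 else 1 + pvScan r (pvUpd c d) := rfl

theorem pvCloses_cons (c : Char) (r : List Char) (d : Nat) :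
    pvCloses (c :: r) d = if pvUpd c d = 0 then true else pvCloses r (pvUpd c d) := rfl

theorem pvNoZ_cons (c : Char) (r : List Char) (d : Nat) :
    pvNoZ (c :: r) d = ((pvUpd c d != 0) && pvNoZ r (pvUpd c d)) := rfl

theorem pvEndD_cons (c : Char) (r : List Char) (d : Nat) :
    pvEndD (c :: r) d = pvEndD r (pvUpd c d) := rfl

theorem pvNotPrefVV (c : Char) (r : List Char)
    (hne : ∀ (t : List Char), c = '\\' → r = 'v' :: 'v' :: '{' :: t → False) :
    ¬ ['\\', 'v', 'v', '{'] <+: (c :: r) := by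
  rintro ⟨w, hw⟩
  simp only [List.cons_append, List.nil_append] at hw
  injection hw with h1 h2
  exact hne w h1.symm h2.symm

-- a balanced segment closes every smaller starting depth
theorem pvCloses_of_bal (a : List Char) : ∀ (d k : Nat), pvNoZ a d = true →
    pvEndD a d = 1 → 1 ≤ k → k < d → pvCloses a k = true := by
  induction a with
  | nil => intro d k _ hend hk1 hkd; simp [pvEndD] at hend; omega
  | cons c r ih =>
    intro d k hnz hend hk1 hkd
    rw [pvNoZ_cons, Bool.and_eq_true, bne_iff_ne] at hnz
    rw [pvEndD_cons] at hend
    by_cases h0 : pvUpd c k = 0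
    · rw [pvCloses_cons, if_pos h0]
    · rw [pvCloses_cons, if_neg h0]
      exact ih (pvUpd c d) (pvUpd c k) hnz.2 hend (by omega)
        (by revert h0 hnz; unfold pvUpd; split_ifs <;> omega)

-- decomposition of a closing scan: the consumed part is `a ++ ['}']` with `a` balanced
theorem pvCloses_decomp (t : List Char) : ∀ (d : Nat), 1 ≤ d → pvCloses t d = true →
    ∃ a b, t = a ++ '}' :: b ∧ pvScan t d = a.length + 1 ∧ pvNoZ a d = true ∧ pvEndD a d = 1 := by
  induction t with
  | nil => intro d _ h; simp [pvCloses] at h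
  | cons c r ih =>
    intro d hd h
    by_cases h0 : pvUpd c d = 0
    · have hc : c = '}' ∧ d = 1 := by
        by_cases h1 : c = '{'
        · simp [pvUpd, h1] at h0
        · by_cases h2 : c = '}'
          · exact ⟨h2, by simp [pvUpd, h1, h2] at h0; omega⟩
          · simp [pvUpd, h1, h2] at h0; omega
      obtain ⟨rfl, rfl⟩ := hc
      exact ⟨[], r, by simp, by rw [pvScan_cons, if_pos h0]; rfl, rfl, rfl⟩
    · rw [pvCloses_cons, if_neg h0] at h
      obtain ⟨a, b, rfl, hs, hnz, he⟩ := ih (pvUpd c d) (by omega) h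
      refine ⟨c :: a, b, rfl, ?_, ?_, by rw [pvEndD_cons]; exact he⟩
      · rw [pvScan_cons, if_neg h0, hs]; simp; omega
      · rw [pvNoZ_cons, Bool.and_eq_true, bne_iff_ne]
        exact ⟨h0, hnz⟩

theorem pvGoodT_cons (tok : List Char) (c : Char) (r : List Char)
    (h : pvGoodT tok (c :: r) = true) : pvGoodT tok r = true := by
  simp [pvGoodT] at h; exact h.2

theorem pvGoodT_suffix (tok x y : List Char) (h : pvGoodT tok (x ++ y) = true) :
    pvGoodT tok y = true := by
  induction x with
  | nil => exact h
  | cons c r ih => exact ih (pvGoodT_cons tok c (r ++ y) h)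

theorem pvGoodT_fires (tok : List Char) (c : Char) (r : List Char)
    (h : pvGoodT tok (c :: r) = true) (hp : tok.isPrefixOf (c :: r) = true) :
    pvCloses (List.drop tok.length (c :: r)) 1 = true := by
  simp [pvGoodT, hp] at h; exact h.1

-- every macro occurrence inside a balanced segment closes inside it
theorem pvGoodT_of_bal (tok : List Char) (hnz : ∀ d, 1 ≤ d → pvNoZ tok d = true)
    (hed : ∀ d, pvEndD tok d = d + 1) (a : List Char) (d : Nat) (hd : 1 ≤ d)
    (ha : pvNoZ a d = true) (he : pvEndD a d = 1) : pvGoodT tok a = true := by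
  induction a generalizing d with
  | nil => rfl
  | cons c r ih =>
    have hnzr : pvNoZ r (pvUpd c d) = true ∧ pvUpd c d ≠ 0 := by
      simp [pvNoZ] at ha; exact ⟨ha.2, ha.1⟩
    have her : pvEndD r (pvUpd c d) = 1 := by simpa [pvEndD] using he
    simp only [pvGoodT, Bool.and_eq_true]
    refine ⟨?_, ih (pvUpd c d) (by omega) hnzr.1 her⟩
    split_ifs with hp
    · obtain ⟨w, hw⟩ := (List.isPrefixOf_iff_prefix.mp hp)
      have hdrop : List.drop tok.length (c :: r) = w := by rw [← hw, List.drop_left]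
      rw [hdrop]
      have h1 : pvNoZ w (pvEndD tok d) = true := by
        have h' := pvNoZ_append tok w d
        rw [hw, ha] at h'
        simp only [Bool.true_eq, Bool.and_eq_true] at h'
        exact h'.2
      have h2 : pvEndD w (pvEndD tok d) = 1 := by
        have h' := pvEndD_append tok w d
        rw [hw, he] at h'
        exact h'.symm
      rw [hed d] at h1 h2
      exact pvCloses_of_bal w (d + 1) 1 h1 h2 le_rfl (by omega)
    · rfl

-- ---- reduction lemmas for the catch-all arms of the pattern matches ----

theorem pvSV_cons_ne (c : Char) (r : List Char)
    (h : ¬ ['\\', 'v', 'v', '{'] <+: (c :: r)) : pvSV (c :: r) = c :: pvSV r := by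
  rw [pvSV.eq_def]
  split <;> simp_all [List.cons_prefix_cons]

theorem pvExpandVV_cons_ne (c : Char) (r : List Char)
    (h : ¬ ['\\', 'v', 'v', '{'] <+: (c :: r)) : pvExpandVV (c :: r) = c :: pvExpandVV r := by
  rw [pvExpandVV.eq_def]
  split <;> simp_all [List.cons_prefix_cons]

theorem pvExpandMagn_cons_ne (c : Char) (r : List Char)
    (h : ¬ ['\\', 'm', 'a', 'g', 'n', '{'] <+: (c :: r)) :
    pvExpandMagn (c :: r) = c :: pvExpandMagn r := by
  rw [pvExpandMagn.eq_def]
  split <;> simp_all [List.cons_prefix_cons]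

theorem pvMach_cons_ne (c : Char) (r : List Char) (st : List Bool)
    (h : ¬ ['\\', 'm', 'a', 'g', 'n', '{'] <+: (c :: r)) (h1 : c ≠ '{') (h2 : c ≠ '}') :
    pvMach (c :: r) st = c :: pvMach r st := by
  rw [pvMach.eq_def]
  split <;> simp_all [List.cons_prefix_cons]

-- a macro opener never spans the junction with a following '}'
theorem pvJunction (tok : List Char) (hne : '}' ∉ tok) (c : Char) (r b : List Char)
    (h : ¬ tok <+: (c :: r)) : ¬ tok <+: (c :: (r ++ '}' :: b)) := by
  intro hp
  by_cases hl : tok.length ≤ (c :: r).length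
  · apply h
    have h1 : tok = ((c :: r) ++ ('}' :: b)).take tok.length := by
      rw [← List.prefix_iff_eq_take]
      simpa using hp
    rw [List.take_append_of_le_length hl] at h1
    rw [h1]
    exact List.take_prefix _ _
  · obtain ⟨w, hw⟩ := hp
    apply hne
    have : tok.length ≤ (c :: (r ++ '}' :: b)).length := by
      rw [← hw]; simp
    have hget : (c :: (r ++ '}' :: b))[(c :: r).length]? = some '}' := by
      rw [show (c :: (r ++ '}' :: b)) = (c :: r) ++ ('}' :: b) by simp]
      simp
    rw [← hw] at hget
    rw [List.getElem?_append_left (by simp at hl ⊢; omega)] at hget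
    exact List.mem_of_getElem? hget

-- pvSV across a '}' junction
theorem pvSV_append (a b : List Char) : pvSV (a ++ '}' :: b) = pvSV a ++ '}' :: pvSV b := by
  induction a using pvSV.induct with
  | case1 t ih =>
    simp only [List.cons_append]
    rw [show pvSV ('\\' :: 'v' :: 'v' :: '{' :: (t ++ '}' :: b)) =
        '\\' :: 'v' :: 'e' :: 'c' :: '{' :: pvSV (t ++ '}' :: b) from rfl]
    rw [show pvSV ('\\' :: 'v' :: 'v' :: '{' :: t) =
        '\\' :: 'v' :: 'e' :: 'c' :: '{' :: pvSV t from rfl]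
    simp [ih]
  | case2 c r hne ih =>
    have hnp : ¬ ['\\', 'v', 'v', '{'] <+: (c :: r) := pvNotPrefVV c r hne
    simp only [List.cons_append]
    rw [pvSV_cons_ne _ _ (pvJunction _ (by decide) c r b hnp), pvSV_cons_ne _ _ hnp]
    simp [ih]
  | case3 => simp [pvSV]

-- token depth facts
theorem pvTokVV_noZ (d : Nat) (hd : 1 ≤ d) : pvNoZ ['\\', 'v', 'v', '{'] d = true := by
  simp [pvNoZ, pvUpd]; omega

theorem pvTokVV_end (d : Nat) : pvEndD ['\\', 'v', 'v', '{'] d = d + 1 := by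
  simp [pvEndD, pvUpd]

theorem pvTokM_noZ (d : Nat) (hd : 1 ≤ d) : pvNoZ ['\\', 'm', 'a', 'g', 'n', '{'] d = true := by
  simp [pvNoZ, pvUpd]; omega

theorem pvTokM_end (d : Nat) : pvEndD ['\\', 'm', 'a', 'g', 'n', '{'] d = d + 1 := by
  simp [pvEndD, pvUpd]

-- O1: under Pre_, A's first pass is the literal substitution
theorem pvExpandVV_eq_sv (t : List Char) (h : pvGoodT ['\\', 'v', 'v', '{'] t = true) :
    pvExpandVV t = pvSV t := by
  induction t using pvExpandVV.induct with
  | case1 tail k ih1 ih2 =>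
    have hcl : pvCloses tail 1 = true := by
      have hfire := pvGoodT_fires ['\\', 'v', 'v', '{'] '\\' ('v' :: 'v' :: '{' :: tail) h
        (by rfl)
      simpa using hfire
    obtain ⟨a, b, hab, hs, hnz, he⟩ := pvCloses_decomp tail 1 le_rfl hcl
    have hk : k = pvScan tail 1 := rfl
    rw [hk] at ih1 ih2
    have htake : List.take (pvScan tail 1 - 1) tail = a := by
      rw [hs, hab, Nat.add_sub_cancel]
      exact List.take_left' rfl
    have hdrop : List.drop (pvScan tail 1) tail = b := by
      rw [hs, hab, show a ++ '}' :: b = (a ++ ['}']) ++ b by simp,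
          show a.length + 1 = (a ++ ['}']).length by simp]
      exact List.drop_left
    have hga : pvGoodT ['\\', 'v', 'v', '{'] a = true :=
      pvGoodT_of_bal _ pvTokVV_noZ pvTokVV_end a 1 le_rfl hnz he
    have hgb : pvGoodT ['\\', 'v', 'v', '{'] b = true := by
      have h4 : pvGoodT ['\\', 'v', 'v', '{'] tail = true := by
        apply pvGoodT_suffix _ ['\\', 'v', 'v', '{'] _
        simpa using h
      rw [hab] at h4
      exact pvGoodT_cons _ _ _ (pvGoodT_suffix _ a _ h4)
    rw [show pvExpandVV ('\\' :: 'v' :: 'v' :: '{' :: tail) =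
        '\\' :: 'v' :: 'e' :: 'c' :: '{' ::
          (pvExpandVV (List.take (pvScan tail 1 - 1) tail) ++
            '}' :: pvExpandVV (List.drop (pvScan tail 1) tail))
        from by rw [pvExpandVV.eq_def]; rfl]
    rw [show pvSV ('\\' :: 'v' :: 'v' :: '{' :: tail) =
        '\\' :: 'v' :: 'e' :: 'c' :: '{' :: pvSV tail from rfl]
    rw [htake] at ih1
    rw [hdrop] at ih2
    rw [htake, hdrop, ih1 hga, ih2 hgb, hab, pvSV_append]
  | case2 c r hne ih =>
    have hnp : ¬ ['\\', 'v', 'v', '{'] <+: (c :: r) := pvNotPrefVV c r hne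
    rw [pvExpandVV_cons_ne _ _ hnp, pvSV_cons_ne _ _ hnp, ih (pvGoodT_cons _ _ _ h)]
  | case3 => rw [pvExpandVV.eq_def]; rfl

-- B's `replace` call computes the same substitution
theorem pvReplace_go_eq (fuel : Nat) (l acc : List Char) (h : l.length ≤ fuel) :
    PySem.Chars.replace.go ['\\', 'v', 'v', '{'] ['\\', 'v', 'e', 'c', '{'] fuel l acc =
      acc.reverse ++ pvSV l := by
  induction fuel generalizing l acc with
  | zero =>
    have : l = [] := by cases l <;> simp_all
    subst this; simp [PySem.Chars.replace.go, pvSV]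
  | succ n ih =>
    cases l with
    | nil => simp [PySem.Chars.replace.go, pvSV]
    | cons c t =>
      by_cases hp : ['\\', 'v', 'v', '{'] <+: (c :: t)
      · obtain ⟨w, hw⟩ := hp
        have hpb : List.isPrefixOf ['\\', 'v', 'v', '{'] (c :: t) = true :=
          List.isPrefixOf_iff_prefix.mpr ⟨w, hw⟩
        rw [show PySem.Chars.replace.go ['\\', 'v', 'v', '{'] ['\\', 'v', 'e', 'c', '{'] (n + 1) (c :: t) acc =
            PySem.Chars.replace.go ['\\', 'v', 'v', '{'] ['\\', 'v', 'e', 'c', '{'] n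
              (List.drop 4 (c :: t)) (['\\', 'v', 'e', 'c', '{'].reverse ++ acc) from by
          rw [PySem.Chars.replace.go]; simp [hpb]]
        have hdrop : List.drop 4 (c :: t) = w := by rw [← hw]; rfl
        rw [hdrop, ih w _ (by rw [← hw] at h; simp at h; omega)]
        rw [← hw]
        simp only [List.cons_append, List.nil_append]
        rw [show pvSV ('\\' :: 'v' :: 'v' :: '{' :: w) = '\\' :: 'v' :: 'e' :: 'c' :: '{' :: pvSV w
            from rfl]
        simp
      · have hpb : List.isPrefixOf ['\\', 'v', 'v', '{'] (c :: t) = false := by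
          rw [Bool.eq_false_iff]
          intro hc
          exact hp (List.isPrefixOf_iff_prefix.mp hc)
        rw [show PySem.Chars.replace.go ['\\', 'v', 'v', '{'] ['\\', 'v', 'e', 'c', '{'] (n + 1) (c :: t) acc =
            PySem.Chars.replace.go ['\\', 'v', 'v', '{'] ['\\', 'v', 'e', 'c', '{'] n t (c :: acc) from by
          rw [PySem.Chars.replace.go]; simp [hpb]]
        rw [ih t _ (by simp at h; omega), pvSV_cons_ne _ _ hp]
        simp

theorem pvReplace_eq (s : List Char) :
    PySem.Chars.replace s ['\\', 'v', 'v', '{'] ['\\', 'v', 'e', 'c', '{'] = pvSV s := by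
  rw [PySem.Chars.replace]
  simp only [List.isEmpty_cons, if_false]
  exact pvReplace_go_eq s.length s [] le_rfl

-- the substitution does not create or destroy \magn openers …
theorem pvSV_prefix_iff (tok : List Char) (hns : '\\' ∉ tok) (x : List Char) :
    tok <+: pvSV x ↔ tok <+: x := by
  induction x using pvSV.induct generalizing tok with
  | case1 t ih =>
    cases tok with
    | nil => simp
    | cons h tok' =>
      have hh : h ≠ '\\' := by intro hc; subst hc; exact hns (by simp)
      rw [show pvSV ('\\' :: 'v' :: 'v' :: '{' :: t) = '\\' :: 'v' :: 'e' :: 'c' :: '{' :: pvSV t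
          from rfl]
      simp [List.cons_prefix_cons, hh]
  | case2 c r hne ih =>
    have hnp : ¬ ['\\', 'v', 'v', '{'] <+: (c :: r) := pvNotPrefVV c r hne
    rw [pvSV_cons_ne _ _ hnp]
    cases tok with
    | nil => simp
    | cons h tok' =>
      simp only [List.cons_prefix_cons]
      constructor
      · rintro ⟨h1, h2⟩; exact ⟨h1, (ih tok' (fun hm => hns (by simp [hm]))).mp h2⟩
      · rintro ⟨h1, h2⟩; exact ⟨h1, (ih tok' (fun hm => hns (by simp [hm]))).mpr h2⟩
  | case3 => rfl

theorem pvSV_magn_prefix_iff (x : List Char) :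
    ['\\', 'm', 'a', 'g', 'n', '{'] <+: pvSV x ↔ ['\\', 'm', 'a', 'g', 'n', '{'] <+: x := by
  induction x using pvSV.induct with
  | case1 t ih =>
    rw [show pvSV ('\\' :: 'v' :: 'v' :: '{' :: t) = '\\' :: 'v' :: 'e' :: 'c' :: '{' :: pvSV t
        from rfl]
    simp [List.cons_prefix_cons]
  | case2 c r hne ih =>
    have hnp : ¬ ['\\', 'v', 'v', '{'] <+: (c :: r) := pvNotPrefVV c r hne
    rw [pvSV_cons_ne _ _ hnp]
    simp only [List.cons_prefix_cons]
    constructor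
    · rintro ⟨h1, h2⟩
      exact ⟨h1, (pvSV_prefix_iff ['m', 'a', 'g', 'n', '{'] (by decide) r).mp h2⟩
    · rintro ⟨h1, h2⟩
      exact ⟨h1, (pvSV_prefix_iff ['m', 'a', 'g', 'n', '{'] (by decide) r).mpr h2⟩
  | case3 => rfl

-- … and preserves the brace skeleton, hence brace matching
theorem pvSV_filter (x : List Char) :
    (pvSV x).filter (fun c => c = '{' || c = '}') = x.filter (fun c => c = '{' || c = '}') := by
  induction x using pvSV.induct with
  | case1 t ih =>
    rw [show pvSV ('\\' :: 'v' :: 'v' :: '{' :: t) = '\\' :: 'v' :: 'e' :: 'c' :: '{' :: pvSV t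
        from rfl]
    simp [List.filter, ih]
  | case2 c r hne ih =>
    have hnp : ¬ ['\\', 'v', 'v', '{'] <+: (c :: r) := pvNotPrefVV c r hne
    rw [pvSV_cons_ne _ _ hnp]
    simp [List.filter, ih]
  | case3 => rfl

theorem pvCloses_filter (x : List Char) (d : Nat) (hd : 1 ≤ d) :
    pvCloses x d = pvCloses (x.filter (fun c => c = '{' || c = '}')) d := by
  induction x generalizing d with
  | nil => rfl
  | cons c r ih =>
    by_cases hb : (c = '{' || c = '}') = true
    · simp only [List.filter_cons, hb, if_true]
      rw [pvCloses.eq_def, pvCloses.eq_def]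
      simp only []
      by_cases h0 : pvUpd c d = 0
      · simp [h0]
      · simp [h0]
        exact ih (pvUpd c d) (by omega)
    · have hupd : pvUpd c d = d := by
        simp at hb
        simp [pvUpd, hb.1, hb.2]
      simp only [List.filter_cons, hb]
      rw [show pvCloses (c :: r) d = pvCloses r d from by
        rw [pvCloses.eq_def]; simp [hupd]; omega]
      simp
      exact ih d hd

theorem pvCloses_sv (x : List Char) : pvCloses (pvSV x) 1 = pvCloses x 1 := by
  rw [pvCloses_filter (pvSV x) 1 le_rfl, pvCloses_filter x 1 le_rfl, pvSV_filter]

-- GM: goodness of the \magn occurrences survives the substitution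
theorem pvGoodT_sv (t : List Char) (h : pvGoodT ['\\', 'm', 'a', 'g', 'n', '{'] t = true) :
    pvGoodT ['\\', 'm', 'a', 'g', 'n', '{'] (pvSV t) = true := by
  induction t using pvSV.induct with
  | case1 w ih =>
    have hw : pvGoodT ['\\', 'm', 'a', 'g', 'n', '{'] w = true := by
      apply pvGoodT_suffix _ ['\\', 'v', 'v', '{'] _
      simpa using h
    rw [show pvSV ('\\' :: 'v' :: 'v' :: '{' :: w) = '\\' :: 'v' :: 'e' :: 'c' :: '{' :: pvSV w
        from rfl]
    rw [show pvGoodT ['\\', 'm', 'a', 'g', 'n', '{'] ('\\' :: 'v' :: 'e' :: 'c' :: '{' :: pvSV w) =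
        pvGoodT ['\\', 'm', 'a', 'g', 'n', '{'] (pvSV w) from rfl]
    exact ih hw
  | case2 c r hne ih =>
    have hnp : ¬ ['\\', 'v', 'v', '{'] <+: (c :: r) := pvNotPrefVV c r hne
    rw [pvSV_cons_ne _ _ hnp]
    simp only [pvGoodT, Bool.and_eq_true]
    refine ⟨?_, ih (pvGoodT_cons _ _ _ h)⟩
    by_cases hp : ['\\', 'm', 'a', 'g', 'n', '{'] <+: (c :: pvSV r)
    · have hp' : ['\\', 'm', 'a', 'g', 'n', '{'] <+: (c :: r) := by
        have : (c :: pvSV r) = pvSV (c :: r) := (pvSV_cons_ne _ _ hnp).symm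
        rw [this] at hp
        exact (pvSV_magn_prefix_iff (c :: r)).mp hp
      have hcl : pvCloses (List.drop 6 (c :: r)) 1 = true :=
        pvGoodT_fires _ _ _ h (List.isPrefixOf_iff_prefix.mpr hp')
      rw [if_pos (List.isPrefixOf_iff_prefix.mpr hp)]
      obtain ⟨w, hw⟩ := hp'
      have hr : r = 'm' :: 'a' :: 'g' :: 'n' :: '{' :: w := by
        have h2 := hw
        simp only [List.cons_append, List.nil_append] at h2
        injection h2 with _ h3
        exact h3.symm
      subst hr
      have hsv : pvSV ('m' :: 'a' :: 'g' :: 'n' :: '{' :: w) =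
          'm' :: 'a' :: 'g' :: 'n' :: '{' :: pvSV w := by
        rw [pvSV_cons_ne _ _ (by simp [List.cons_prefix_cons])]
        rw [pvSV_cons_ne _ _ (by simp [List.cons_prefix_cons])]
        rw [pvSV_cons_ne _ _ (by simp [List.cons_prefix_cons])]
        rw [pvSV_cons_ne _ _ (by simp [List.cons_prefix_cons])]
        rw [pvSV_cons_ne _ _ (by simp [List.cons_prefix_cons])]
      rw [hsv]
      rw [show List.drop ['\\', 'm', 'a', 'g', 'n', '{'].length
          (c :: 'm' :: 'a' :: 'g' :: 'n' :: '{' :: pvSV w) = pvSV w from rfl]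
      rw [pvCloses_sv]
      rw [show List.drop 6 (c :: 'm' :: 'a' :: 'g' :: 'n' :: '{' :: w) = w from rfl] at hcl
      exact hcl
    · rw [if_neg]
      intro hc
      exact hp (List.isPrefixOf_iff_prefix.mp hc)
  | case3 => rfl

-- the machine run on a balanced segment splits off at its closing brace
theorem pvMach_split (n : Nat) : ∀ (a : List Char), a.length ≤ n → ∀ (b : List Char)
    (st1 st0 : List Bool), pvNoZ a (st1.length + 1) = true → pvEndD a (st1.length + 1) = 1 →
    pvMach (a ++ '}' :: b) (st1 ++ st0) = pvMach a st1 ++ pvMach ('}' :: b) st0 := by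
  induction n with
  | zero =>
    intro a ha b st1 st0 hnz hend
    have ha' : a = [] := by cases a <;> simp_all
    subst ha'
    have hst : st1 = [] := by simp [pvEndD] at hend; cases st1 <;> simp_all
    subst hst
    rfl
  | succ n ih =>
    intro a ha b st1 st0 hnz hend
    by_cases hm : ['\\', 'm', 'a', 'g', 'n', '{'] <+: a
    · obtain ⟨r, rfl⟩ := hm
      have hnz' : pvNoZ r (st1.length + 2) = true := by
        rw [pvNoZ_append, Bool.and_eq_true] at hnz
        have h2 := hnz.2
        rwa [pvTokM_end] at h2
      have hend' : pvEndD r (st1.length + 2) = 1 := by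
        rw [pvEndD_append, pvTokM_end] at hend
        exact hend
      have hlen : r.length ≤ n := by simp at ha; omega
      have hstep := ih r hlen b (true :: st1) st0 (by simpa using hnz') (by simpa using hend')
      simp only [List.cons_append, List.nil_append, List.append_assoc] at hstep ⊢
      rw [show pvMach ('\\' :: 'm' :: 'a' :: 'g' :: 'n' :: '{' :: (r ++ '}' :: b)) (st1 ++ st0) =
          '|' :: pvMach (r ++ '}' :: b) (true :: (st1 ++ st0)) from rfl]
      rw [show pvMach ('\\' :: 'm' :: 'a' :: 'g' :: 'n' :: '{' :: r) st1 =
          '|' :: pvMach r (true :: st1) from rfl]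
      rw [hstep]
      simp
    · cases a with
      | nil =>
        simp [pvEndD] at hend
        have hst : st1 = [] := by cases st1 <;> simp_all
        subst hst
        rfl
      | cons c r =>
        by_cases hc1 : c = '{'
        · subst hc1
          have hnz' : pvNoZ r (st1.length + 2) = true := by
            rw [pvNoZ_cons] at hnz
            simp only [pvUpd, if_pos rfl] at hnz
            simp only [Bool.and_eq_true] at hnz
            simpa using hnz.2
          have hend' : pvEndD r (st1.length + 2) = 1 := by
            rw [pvEndD_cons] at hend
            simpa [pvUpd] using hend
          have hstep := ih r (by simp only [List.length_cons] at ha; omega) b (false :: st1) st0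
            (by simpa using hnz') (by simpa using hend')
          simp only [List.cons_append, List.nil_append] at hstep ⊢
          rw [show pvMach ('{' :: (r ++ '}' :: b)) (st1 ++ st0) =
              '{' :: pvMach (r ++ '}' :: b) (false :: (st1 ++ st0)) from rfl]
          rw [show pvMach ('{' :: r) st1 = '{' :: pvMach r (false :: st1) from rfl]
          rw [hstep]
          simp
        · by_cases hc2 : c = '}'
          · subst hc2
            have hne0 : st1.length ≠ 0 := by
              rw [pvNoZ_cons] at hnz
              simp only [pvUpd] at hnz
              simp only [Bool.and_eq_true, bne_iff_ne] at hnz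
              have := hnz.1
              simp at this ⊢
              omega
            obtain ⟨x, st1', rfl⟩ : ∃ x st1', st1 = x :: st1' := by
              cases st1 with
              | nil => simp at hne0
              | cons x s => exact ⟨x, s, rfl⟩
            have hnz' : pvNoZ r (st1'.length + 1) = true := by
              rw [pvNoZ_cons] at hnz
              simp only [pvUpd] at hnz
              simp only [Bool.and_eq_true] at hnz
              simpa using hnz.2
            have hend' : pvEndD r (st1'.length + 1) = 1 := by
              rw [pvEndD_cons] at hend
              simpa [pvUpd] using hend
            have hstep := ih r (by simp only [List.length_cons] at ha; omega) b st1' st0 hnz' hend'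
            simp only [List.cons_append, List.nil_append] at hstep ⊢
            rw [show pvMach ('}' :: (r ++ '}' :: b)) (x :: (st1' ++ st0)) =
                (if x then '|' else '}') :: pvMach (r ++ '}' :: b) (st1' ++ st0) from rfl]
            rw [show pvMach ('}' :: r) (x :: st1') =
                (if x then '|' else '}') :: pvMach r st1' from rfl]
            rw [hstep]
            simp
          · have hnz' : pvNoZ r (st1.length + 1) = true := by
              rw [pvNoZ_cons] at hnz
              simp only [pvUpd, if_neg hc1, if_neg hc2] at hnz
              simp only [Bool.and_eq_true] at hnz
              exact hnz.2
            have hend' : pvEndD r (st1.length + 1) = 1 := by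
              rw [pvEndD_cons] at hend
              simpa [pvUpd, if_neg hc1, if_neg hc2] using hend
            have hstep := ih r (by simp only [List.length_cons] at ha; omega) b st1 st0 hnz' hend'
            simp only [List.cons_append, List.nil_append] at hstep ⊢
            rw [pvMach_cons_ne c _ _ (pvJunction _ (by decide) c r b hm) hc1 hc2]
            rw [pvMach_cons_ne c _ _ hm hc1 hc2]
            rw [hstep]
            simp

-- O2: the machine coincides with A's second pass on \magn-good text
theorem pvMach_eq_expandMagn (n : Nat) : ∀ (s : List Char), s.length ≤ n →
    pvGoodT ['\\', 'm', 'a', 'g', 'n', '{'] s = true → ∀ (st : List Bool),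
    (∀ x ∈ st, x = false) → pvMach s st = pvExpandMagn s := by
  induction n with
  | zero =>
    intro s hs _ st _
    have hs' : s = [] := by cases s <;> simp_all
    subst hs'
    rw [pvExpandMagn.eq_def]
    rfl
  | succ n ih =>
    intro s hs hg st hst
    by_cases hm : ['\\', 'm', 'a', 'g', 'n', '{'] <+: s
    · obtain ⟨w, rfl⟩ := hm
      have hcl : pvCloses w 1 = true :=
        pvGoodT_fires ['\\', 'm', 'a', 'g', 'n', '{'] '\\' ('m' :: 'a' :: 'g' :: 'n' :: '{' :: w)
          hg (by rfl)
      obtain ⟨a, b, hab, hsc, hnz, he⟩ := pvCloses_decomp w 1 le_rfl hcl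
      have htake : List.take (pvScan w 1 - 1) w = a := by
        rw [hsc, hab, Nat.add_sub_cancel]
        exact List.take_left' rfl
      have hdrop : List.drop (pvScan w 1) w = b := by
        rw [hsc, hab, show a ++ '}' :: b = (a ++ ['}']) ++ b by simp,
            show a.length + 1 = (a ++ ['}']).length by simp]
        exact List.drop_left
      have hga : pvGoodT ['\\', 'm', 'a', 'g', 'n', '{'] a = true :=
        pvGoodT_of_bal _ pvTokM_noZ pvTokM_end a 1 le_rfl hnz he
      have hgb : pvGoodT ['\\', 'm', 'a', 'g', 'n', '{'] b = true := by
        have h4 : pvGoodT ['\\', 'm', 'a', 'g', 'n', '{'] w = true :=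
          pvGoodT_suffix _ ['\\', 'm', 'a', 'g', 'n', '{'] _ (by simpa using hg)
        rw [hab] at h4
        exact pvGoodT_cons _ _ _ (pvGoodT_suffix _ a _ h4)
      have halen : a.length ≤ n := by
        have h1 : a.length < w.length := by rw [hab]; simp
        simp at hs
        omega
      have hblen : b.length ≤ n := by
        have h1 : b.length < w.length := by rw [hab]; simp; omega
        simp at hs
        omega
      rw [show pvMach (['\\', 'm', 'a', 'g', 'n', '{'] ++ w) st =
          '|' :: pvMach w (true :: st) from rfl]
      rw [show pvExpandMagn (['\\', 'm', 'a', 'g', 'n', '{'] ++ w) =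
          '|' :: (pvExpandMagn (List.take (pvScan w 1 - 1) w) ++
            '|' :: pvExpandMagn (List.drop (pvScan w 1) w))
          from by rw [pvExpandMagn.eq_def]; rfl]
      rw [htake, hdrop]
      have hsplit := pvMach_split n a halen b [] (true :: st) hnz he
      simp only [List.nil_append] at hsplit
      rw [hab, hsplit]
      rw [show pvMach ('}' :: b) (true :: st) = '|' :: pvMach b st from rfl]
      rw [ih a halen hga [] (by simp), ih b hblen hgb st hst]
    · cases s with
      | nil => rw [pvExpandMagn.eq_def]; rfl
      | cons c r =>
        have hgr : pvGoodT ['\\', 'm', 'a', 'g', 'n', '{'] r = true := pvGoodT_cons _ _ _ hg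
        have hrlen : r.length ≤ n := by simp only [List.length_cons] at hs; omega
        rw [pvExpandMagn_cons_ne _ _ hm]
        by_cases hc1 : c = '{'
        · subst hc1
          have hst' : ∀ x ∈ (false :: st), x = false := by
            intro x hx
            cases hx with
            | head => rfl
            | tail _ h => exact hst x h
          rw [show pvMach ('{' :: r) st = '{' :: pvMach r (false :: st) from rfl]
          rw [ih r hrlen hgr (false :: st) hst']
        · by_cases hc2 : c = '}'
          · subst hc2
            cases st with
            | nil =>
              rw [show pvMach ('}' :: r) ([] : List Bool) = '}' :: pvMach r [] from rfl]
              rw [ih r hrlen hgr [] (by simp)]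
            | cons x st' =>
              have hx : x = false := hst x List.mem_cons_self
              subst hx
              have hst' : ∀ y ∈ st', y = false := fun y hy => hst y (List.mem_cons_of_mem _ hy)
              rw [show pvMach ('}' :: r) (false :: st') =
                  (if false then '|' else '}') :: pvMach r st' from rfl]
              rw [ih r hrlen hgr st' hst']
              simp
          · rw [pvMach_cons_ne c r st hm hc1 hc2]
            rw [ih r hrlen hgr st hst]

-- ===== VERDICT (by name: the statement is the Claim_ definition above) =====
theorem expand_custom_macros_py_spec : Claim_equal_expand_custom_macros_py := by
  intro latex _ hpre
  unfold Spec_expand_custom_macros_py expand_custom_macros_py expand_custom_macros_py_alt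
  obtain ⟨hvv, hmagn⟩ := hpre
  have htl : (PySem.Str.replace latex "\\vv{" "\\vec{").toList = pvSV latex.toList := by
    rw [PySem.Str.toList_replace]
    rw [show ("\\vv{" : String).toList = ['\\', 'v', 'v', '{'] from rfl]
    rw [show ("\\vec{" : String).toList = ['\\', 'v', 'e', 'c', '{'] from rfl]
    exact pvReplace_eq latex.toList
  rw [htl]
  rw [pvExpandVV_eq_sv latex.toList hvv]
  rw [pvMach_eq_expandMagn (pvSV latex.toList).length (pvSV latex.toList) le_rfl
    (pvGoodT_sv latex.toList hmagn) [] (by simp)]
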